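-- pv_equiv track=rewrite | github.com/ekinrf/ProgPuzzles | Array/python/answer_queries.py | answer_quires
-- ===== SOURCE A (Python) =====
-- from typing import List
-- import bisect
--
-- def answer_quires(quires: List[List[int]], n: int):
--     true_states = []
--     res = []
--     for q in quires:
--         if q[0] == 1:
--             bisect.insort(true_states, q[1])
--         else:
--             ans = -1
--             if true_states:
--                 pos = bisect.bisect_left(true_states, q[1])
--                 if pos != len(true_states):
--                     ans = true_states[pos]
--             res.append(ans)
--     return res
-- ===== SOURCE B (Python) =====
-- from typing import List
--
--
-- def answer_quires(quires: List[List[int]], n: int):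
--     # Keep insertions unsorted; a successor query is just min of the values >= x.
--     seen = []
--     res = []
--     for q in quires:
--         if q[0] == 1:
--             seen.append(q[1])
--         else:
--             cands = [v for v in seen if v >= q[1]]
--             res.append(min(cands) if cands else -1)
--     return res
-- ===== Notes on version B (the rewrite author's own statement) =====
-- stated objective: alternative
-- what changed: B drops the sorted list and bisection entirely: it appends insertions unsorted and answers each successor query as min of the stored values >= x (with -1 default), instead of maintaining sorted order with insort and bisect_left.
import Mathlib
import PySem

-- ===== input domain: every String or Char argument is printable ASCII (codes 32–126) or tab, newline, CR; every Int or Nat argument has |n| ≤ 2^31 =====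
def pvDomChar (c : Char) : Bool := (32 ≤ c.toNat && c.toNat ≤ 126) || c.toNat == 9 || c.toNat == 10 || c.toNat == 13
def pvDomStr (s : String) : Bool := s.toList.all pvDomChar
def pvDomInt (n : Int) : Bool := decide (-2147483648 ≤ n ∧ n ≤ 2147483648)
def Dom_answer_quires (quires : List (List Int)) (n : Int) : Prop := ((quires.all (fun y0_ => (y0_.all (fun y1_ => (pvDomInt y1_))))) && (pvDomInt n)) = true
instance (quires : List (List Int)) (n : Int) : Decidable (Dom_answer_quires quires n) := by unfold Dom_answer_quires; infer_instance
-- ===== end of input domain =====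

-- B replaces the sorted list + bisect of A by an unsorted list of inserts and answers
-- each successor query as the minimum of the stored values ≥ x (objective: alternative).
-- Outside Pre_ (a query with fewer than 2 entries) Python A raises IndexError; the ports
-- read such entries with pyGetD's default and nothing is claimed there.

-- ===== PORT A =====
-- bisect.insort(xs, x): insert x at the bisect_right position (exact: same sorted list).
def pvInsort (xs : List Int) (x : Int) : List Int :=
  let pos := PySem.List.bisectRight xs x
  xs.take pos ++ x :: xs.drop pos

def pvStepA (s : List Int × List Int) (q : List Int) : List Int × List Int :=
  if PySem.List.pyGetD q 0 0 = 1 then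
    (pvInsort s.1 (PySem.List.pyGetD q 1 0), s.2)
  else
    let ans : Int :=
      if s.1 ≠ [] then
        let pos := PySem.List.bisectLeft s.1 (PySem.List.pyGetD q 1 0)
        if pos ≠ s.1.length then s.1.getD pos (-1) else -1
      else -1
    (s.1, s.2 ++ [ans])

def answer_quires (quires : List (List Int)) (n : Int) : List Int :=
  (quires.foldl pvStepA ([], [])).2

-- ===== PORT B =====
def pvStepB (s : List Int × List Int) (q : List Int) : List Int × List Int :=
  if PySem.List.pyGetD q 0 0 = 1 then
    (s.1 ++ [PySem.List.pyGetD q 1 0], s.2)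
  else
    let cands := s.1.filter (fun v => PySem.List.pyGetD q 1 0 ≤ v)
    let ans : Int :=
      match PySem.List.min? cands (fun v => v) with
      | some m => m
      | none => -1
    (s.1, s.2 ++ [ans])

def answer_quires_alt (quires : List (List Int)) (n : Int) : List Int :=
  (quires.foldl pvStepB ([], [])).2

-- ===== PRECONDITION & SPEC =====
-- Pre_ excludes exactly the inputs on which Python A raises IndexError: a query with fewer
-- than two entries — except a lone non-insert query [t] (t ≠ 1) arriving before any insert
-- query, on which A never reads q[1] and returns -1 (as does B).
def Pre_answer_quires (quires : List (List Int)) (n : Int) : Prop :=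
  ∀ i < quires.length, 2 ≤ (quires.getD i []).length ∨
    ((quires.getD i []).length = 1 ∧ (quires.getD i []).getD 0 0 ≠ 1 ∧
      ∀ j < i, (quires.getD j []).getD 0 0 ≠ 1)
instance (quires : List (List Int)) (n : Int) : Decidable (Pre_answer_quires quires n) := by
  unfold Pre_answer_quires; infer_instance

def pvWitness_answer_quires : List (List Int) × Int := ([[1, 3], [1, 1], [2, 2]], 0)

def Spec_answer_quires (quires : List (List Int)) (n : Int) (out : List Int) : Prop := out = answer_quires_alt quires n
instance (quires : List (List Int)) (n : Int) (out : List Int) : Decidable (Spec_answer_quires quires n out) := by unfold Spec_answer_quires; infer_instance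

-- ===== CLAIM (what is proved, stated in full; the proofs are below) =====
def Claim_equal_answer_quires : Prop := ∀ (quires : List (List Int)) (n : Int), Dom_answer_quires quires n → Pre_answer_quires quires n → Spec_answer_quires quires n (answer_quires quires n)

-- ===== LEMMAS AND PROOFS =====

theorem pvInsort_perm (xs : List Int) (x : Int) : (pvInsort xs x).Perm (x :: xs) := by
  unfold pvInsort
  calc (xs.take (PySem.List.bisectRight xs x) ++ x :: xs.drop (PySem.List.bisectRight xs x)).Perm
        (x :: (xs.take (PySem.List.bisectRight xs x) ++ xs.drop (PySem.List.bisectRight xs x))) :=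
        List.perm_middle
    _ = x :: xs := by rw [List.take_append_drop]

theorem pvInsort_pairwise (xs : List Int) (x : Int) (h : xs.Pairwise (· ≤ ·)) :
    (pvInsort xs x).Pairwise (· ≤ ·) := by
  obtain ⟨hle, hlt, hge⟩ := PySem.List.bisectRight_spec xs x h
  unfold pvInsort
  rw [List.pairwise_append]
  refine ⟨h.sublist (List.take_sublist _ _), ?_, ?_⟩
  · rw [List.pairwise_cons]
    refine ⟨?_, h.sublist (List.drop_sublist _ _)⟩
    intro v hv
    obtain ⟨j, hj, rfl⟩ := List.mem_iff_getElem.mp hv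
    rw [List.length_drop] at hj
    rw [List.getElem_drop]
    have := hge (PySem.List.bisectRight xs x + j) (by omega) (by omega)
    omega
  · intro u hu v hv
    obtain ⟨i, hi, rfl⟩ := List.mem_iff_getElem.mp hu
    rw [List.getElem_take] at *
    have hi' : i < PySem.List.bisectRight xs x := by
      simp [List.length_take] at hi; omega
    have hux : xs[i]'(by omega) ≤ x := hlt i (by omega) hi'
    rcases List.mem_cons.mp hv with rfl | hv'
    · exact hux
    · obtain ⟨j, hj, rfl⟩ := List.mem_iff_getElem.mp hv'
      rw [List.length_drop] at hj
      rw [List.getElem_drop]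
      have := hge (PySem.List.bisectRight xs x + j) (by omega) (by omega)
      omega

-- Pairwise ≤ gives monotone indexing.
theorem pvSorted_getElem_le {xs : List Int} (h : xs.Pairwise (· ≤ ·)) {i j : Nat}
    (hij : i ≤ j) (hj : j < xs.length) : xs[i]'(by omega) ≤ xs[j] := by
  rcases Nat.lt_or_ge i j with hlt | hge
  · exact (List.pairwise_iff_getElem.mp h) i j (by omega) hj hlt
  · have : i = j := by omega
    subst this; exact le_refl _

-- The heart: on a sorted list, A's bisect answer equals B's min-of-filter answer,
-- computed on any permutation of the list.
theorem pvQuery_eq (a b : List Int) (x : Int) (hperm : a.Perm b) (hsort : a.Pairwise (· ≤ ·)) :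
    (if a ≠ [] then
        (if PySem.List.bisectLeft a x ≠ a.length
          then a.getD (PySem.List.bisectLeft a x) (-1) else -1)
      else (-1 : Int))
    = (match PySem.List.min? (b.filter (fun v => x ≤ v)) (fun v => v) with
        | some m => m
        | none => (-1 : Int)) := by
  obtain ⟨hle, hlt, hge⟩ := PySem.List.bisectLeft_spec a x hsort
  have hfilt : (a.filter (fun v => x ≤ v)).Perm (b.filter (fun v => x ≤ v)) :=
    hperm.filter _
  by_cases ha : a = []
  · subst ha
    have hb : b = [] := hperm.nil_eq.symm
    subst hb
    simp [PySem.List.min?]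
  · simp only [ha, ne_eq, not_false_eq_true, if_true]
    by_cases hpos : PySem.List.bisectLeft a x = a.length
    · -- no element ≥ x
      have hempty : a.filter (fun v => x ≤ v) = [] := by
        rw [List.filter_eq_nil_iff]
        intro v hv
        obtain ⟨j, hj, rfl⟩ := List.mem_iff_getElem.mp hv
        have := hlt j hj (by omega)
        simp; omega
      have hbempty : b.filter (fun v => x ≤ v) = [] := by
        have := hfilt.length_eq
        rw [hempty] at this
        exact List.eq_nil_of_length_eq_zero this.symm
      rw [hbempty]
      simp [hpos, PySem.List.min?]
    · -- successor exists at index pos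
      have hposlt : PySem.List.bisectLeft a x < a.length :=
        lt_of_le_of_ne hle hpos
      have hxa : x ≤ a[PySem.List.bisectLeft a x] := hge _ hposlt (le_refl _)
      have hmem : a[PySem.List.bisectLeft a x] ∈ b.filter (fun v => x ≤ v) := by
        rw [← hfilt.mem_iff]
        rw [List.mem_filter]
        exact ⟨List.getElem_mem _, by simpa using hxa⟩
      have hne : b.filter (fun v => x ≤ v) ≠ [] := by
        intro hnil; rw [hnil] at hmem; exact absurd hmem (List.not_mem_nil)
      obtain ⟨m, hm⟩ : ∃ m, PySem.List.min? (b.filter (fun v => x ≤ v)) (fun v => v) = some m := by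
        cases hmin : PySem.List.min? (b.filter (fun v => x ≤ v)) (fun v => v) with
        | none => exact absurd ((PySem.List.min?_eq_none_iff _ _).mp hmin) hne
        | some m => exact ⟨m, rfl⟩
      rw [hm]
      have hmmem := PySem.List.min?_mem hm
      have hmmin := PySem.List.min?_isMin hm
      -- m ≤ a[pos]
      have h1 : m ≤ a[PySem.List.bisectLeft a x] := hmmin _ hmem
      -- a[pos] ≤ m
      have h2 : a[PySem.List.bisectLeft a x] ≤ m := by
        rw [List.mem_filter] at hmmem
        obtain ⟨hmb, hxm⟩ := hmmem
        have hma : m ∈ a := hperm.mem_iff.mpr hmb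
        obtain ⟨j, hj, rfl⟩ := List.mem_iff_getElem.mp hma
        have hxm' : x ≤ a[j] := by simpa using hxm
        have hjge : PySem.List.bisectLeft a x ≤ j := by
          by_contra hc
          have := hlt j hj (by omega)
          omega
        exact pvSorted_getElem_le hsort hjge hj
      have : a[PySem.List.bisectLeft a x] = m := le_antisymm h2 h1
      simp [hpos, List.getD_eq_getElem?_getD, List.getElem?_eq_getElem hposlt, this]

-- The fold invariant: from related states, the two folds emit equal outputs.
theorem pvFold_eq (quires : List (List Int)) (a b r : List Int)
    (hperm : a.Perm b) (hsort : a.Pairwise (· ≤ ·)) :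
    (quires.foldl pvStepA (a, r)).2 = (quires.foldl pvStepB (b, r)).2 := by
  induction quires generalizing a b r with
  | nil => simp
  | cons q qs ih =>
    simp only [List.foldl_cons]
    by_cases h1 : PySem.List.pyGetD q 0 0 = 1
    · simp only [pvStepA, pvStepB, h1, if_true]
      exact ih _ _ _
        ((pvInsort_perm a _).trans ((hperm.cons _).trans (List.perm_append_singleton _ _).symm))
        (pvInsort_pairwise a _ hsort)
    · simp only [pvStepA, pvStepB, h1, if_false]
      have := pvQuery_eq a b (PySem.List.pyGetD q 1 0) hperm hsort
      simp only [this]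
      exact ih _ _ _ hperm hsort

-- ===== VERDICT (by name: the statement is the Claim_ definition above) =====
theorem answer_quires_spec : Claim_equal_answer_quires := by
  intro quires n _ _
  unfold Spec_answer_quires answer_quires answer_quires_alt
  exact pvFold_eq quires [] [] [] (List.Perm.refl _) (List.Pairwise.nil)
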